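-- pv_equiv track=rewrite | github.com/ShuvalovaVD/CustomTkinterProjectMatrix | logic.py | multiply_matrix_by_number
-- ===== SOURCE A (Python) =====
-- def convert_matrix_input_to_matrix(matrix_input, rows, columns):
--     lst = matrix_input.split()  # разбивает всё в одномерный список, из которого сформируем двумерный
--     matrix = []
--     for i in range(rows):
--         tmp = [0] * columns
--         matrix.append(tmp)
--     for i in range(rows):
--         for j in range(columns):
--             ind = i * columns + j
--             matrix[i][j] = int(lst[ind])
--     return matrix
--
-- def convert_matrix_to_matrix_output(matrix, rows, columns):
--     s_output = ""
--     for i in range(rows):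
--         for j in range(columns):
--             s_output += str(matrix[i][j])
--             if j == columns - 1:
--                 s_output += "\n"
--             else:
--                 s_output += " "
--     return s_output
--
-- def multiply_matrix_by_number(rows_input, columns_input, matrix_input, number_input):  # умножает матрицу на число
--     number = int(number_input)
--     rows = int(rows_input)
--     columns = int(columns_input)
--     matrix = convert_matrix_input_to_matrix(matrix_input, rows, columns)
--     for i in range(rows):
--         for j in range(columns):
--             matrix[i][j] *= number
--     matrix_output = convert_matrix_to_matrix_output(matrix, rows, columns)
--     rows_output, columns_output = rows_input, columns_input
--     return (rows_output, columns_output, matrix_output)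
-- ===== SOURCE B (Python) =====
-- def multiply_matrix_by_number(rows_input, columns_input, matrix_input, number_input):
--     number = int(number_input)
--     rows = int(rows_input)
--     columns = int(columns_input)
--     toks = matrix_input.split()
--     out = []
--     for i in range(rows):
--         for j in range(columns):
--             out.append(str(int(toks[i * columns + j]) * number))
--             out.append("\n" if j == columns - 1 else " ")
--     return (rows_input, columns_input, "".join(out))
-- ===== Notes on version B (the rewrite author's own statement) =====
-- stated objective: simpler
-- what changed: Drops the intermediate 2D matrix and the two nested-traversal helper functions: B reads the flat token list directly at index i*columns+j, multiplies on the fly in a single fused pass, and joins the collected output pieces once.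
import Mathlib
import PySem

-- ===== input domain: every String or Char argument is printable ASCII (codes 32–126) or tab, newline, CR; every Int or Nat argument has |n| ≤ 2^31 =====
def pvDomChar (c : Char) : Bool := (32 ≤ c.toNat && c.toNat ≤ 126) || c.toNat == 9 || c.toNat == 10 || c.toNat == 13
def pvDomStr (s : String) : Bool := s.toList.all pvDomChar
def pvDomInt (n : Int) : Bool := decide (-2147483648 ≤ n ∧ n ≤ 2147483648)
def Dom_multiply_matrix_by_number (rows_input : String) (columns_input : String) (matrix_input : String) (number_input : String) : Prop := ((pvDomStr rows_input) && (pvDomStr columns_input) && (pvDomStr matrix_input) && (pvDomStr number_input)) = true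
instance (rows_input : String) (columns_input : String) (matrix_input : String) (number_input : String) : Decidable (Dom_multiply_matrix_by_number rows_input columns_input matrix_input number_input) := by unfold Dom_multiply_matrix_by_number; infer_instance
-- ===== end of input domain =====

-- B drops A's intermediate 2D matrix and its two nested-traversal helper functions: one fused
-- pass reads the flat token list at index i*columns+j, multiplies on the fly, and joins the
-- collected output pieces once (objective: simpler; same asymptotic cost).

-- ===== PORT A =====
def multiply_matrix_by_number (rows_input : String) (columns_input : String) (matrix_input : String) (number_input : String) : String × String × String :=
  let number := (PySem.Int.ofChars? number_input.toList).getD 0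
  let rows := (PySem.Int.ofChars? rows_input.toList).getD 0
  let columns := (PySem.Int.ofChars? columns_input.toList).getD 0
  -- convert_matrix_input_to_matrix
  let lst := PySem.Chars.split₀ matrix_input.toList
  let matrix0 : List (List Int) := (PySem.List.pyRange 0 rows 1).foldl
      (fun m _ => m ++ [List.replicate columns.toNat (0 : Int)]) []
  let matrix1 := (PySem.List.pyRange 0 rows 1).foldl (fun m i =>
      (PySem.List.pyRange 0 columns 1).foldl (fun m j =>
        PySem.List.pySetD m i (PySem.List.pySetD (PySem.List.pyGetD m i [])
          j ((PySem.Int.ofChars? (PySem.List.pyGetD lst (i * columns + j) [])).getD 0))) m) matrix0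
  -- in-place multiplication loop
  let matrix2 := (PySem.List.pyRange 0 rows 1).foldl (fun m i =>
      (PySem.List.pyRange 0 columns 1).foldl (fun m j =>
        PySem.List.pySetD m i (PySem.List.pySetD (PySem.List.pyGetD m i [])
          j ((PySem.List.pyGetD (PySem.List.pyGetD m i []) j 0) * number))) m) matrix1
  -- convert_matrix_to_matrix_output
  let sOut := (PySem.List.pyRange 0 rows 1).foldl (fun s i =>
      (PySem.List.pyRange 0 columns 1).foldl (fun s j =>
        s ++ PySem.Int.toChars (PySem.List.pyGetD (PySem.List.pyGetD matrix2 i []) j 0)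
          ++ (if j = columns - 1 then ['\n'] else [' '])) s) []
  (rows_input, columns_input, String.ofList sOut)

-- ===== PORT B =====
def multiply_matrix_by_number_alt (rows_input : String) (columns_input : String) (matrix_input : String) (number_input : String) : String × String × String :=
  let number := (PySem.Int.ofChars? number_input.toList).getD 0
  let rows := (PySem.Int.ofChars? rows_input.toList).getD 0
  let columns := (PySem.Int.ofChars? columns_input.toList).getD 0
  let toks := PySem.Chars.split₀ matrix_input.toList
  let out : List (List Char) := (PySem.List.pyRange 0 rows 1).foldl (fun out i =>
      (PySem.List.pyRange 0 columns 1).foldl (fun out j =>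
        (out ++ [PySem.Int.toChars ((PySem.Int.ofChars? (PySem.List.pyGetD toks (i * columns + j) [])).getD 0 * number)])
          ++ [if j = columns - 1 then ['\n'] else [' ']]) out) []
  (rows_input, columns_input, String.ofList (PySem.Chars.join [] out))

-- ===== PRECONDITION & SPEC =====
-- Pre_ excludes exactly the inputs on which A raises: int() ValueError on any of the three
-- scalar strings or on a used matrix token, and IndexError when rows>0, columns>0 but fewer
-- than rows*columns tokens exist.
def Pre_multiply_matrix_by_number (rows_input : String) (columns_input : String) (matrix_input : String) (number_input : String) : Prop :=
  (PySem.Int.ofChars? number_input.toList).isSome = true ∧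
  (PySem.Int.ofChars? rows_input.toList).isSome = true ∧
  (PySem.Int.ofChars? columns_input.toList).isSome = true ∧
  (0 < (PySem.Int.ofChars? rows_input.toList).getD 0 →
    0 < (PySem.Int.ofChars? columns_input.toList).getD 0 →
    ((PySem.Int.ofChars? rows_input.toList).getD 0 * (PySem.Int.ofChars? columns_input.toList).getD 0).toNat
        ≤ (PySem.Chars.split₀ matrix_input.toList).length ∧
    ∀ t ∈ (PySem.Chars.split₀ matrix_input.toList).take
        ((PySem.Int.ofChars? rows_input.toList).getD 0 * (PySem.Int.ofChars? columns_input.toList).getD 0).toNat,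
      (PySem.Int.ofChars? t).isSome = true)
instance (rows_input : String) (columns_input : String) (matrix_input : String) (number_input : String) : Decidable (Pre_multiply_matrix_by_number rows_input columns_input matrix_input number_input) := by unfold Pre_multiply_matrix_by_number; infer_instance
def pvWitness_multiply_matrix_by_number : String × String × String × String := ("2", "3", "1 2 3 4 5 6", "5")
def Spec_multiply_matrix_by_number (rows_input : String) (columns_input : String) (matrix_input : String) (number_input : String) (out : String × String × String) : Prop := out = multiply_matrix_by_number_alt rows_input columns_input matrix_input number_input
instance (rows_input : String) (columns_input : String) (matrix_input : String) (number_input : String) (out : String × String × String) : Decidable (Spec_multiply_matrix_by_number rows_input columns_input matrix_input number_input out) := by unfold Spec_multiply_matrix_by_number; infer_instance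

-- ===== CLAIM (what is proved, stated in full; the proofs are below) =====
def Claim_equal_multiply_matrix_by_number : Prop := ∀ (rows_input : String) (columns_input : String) (matrix_input : String) (number_input : String), Dom_multiply_matrix_by_number rows_input columns_input matrix_input number_input → Pre_multiply_matrix_by_number rows_input columns_input matrix_input number_input → Spec_multiply_matrix_by_number rows_input columns_input matrix_input number_input (multiply_matrix_by_number rows_input columns_input matrix_input number_input)

-- ===== LEMMAS AND PROOFS =====

lemma pv_foldl_set_fixed {α : Type} (d : α) (F : α → Int → α) (i : Int) (hi : 0 ≤ i) :
    ∀ (l : List Int) (m : List α),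
      l.foldl (fun m j => PySem.List.pySetD m i (F (PySem.List.pyGetD m i d) j)) m
      = PySem.List.pySetD m i (l.foldl F (PySem.List.pyGetD m i d)) := by
  intro l
  induction l with
  | nil =>
    intro m
    simp only [List.foldl_nil]
    by_cases h : i.toNat < m.length
    · rw [PySem.List.pySetD_of_nonneg _ _ hi, PySem.List.pyGetD_eq_getElem _ _ hi (by omega)]
      exact (List.set_getElem_self h).symm
    · rw [PySem.List.pySetD_of_nonneg _ _ hi, List.set_eq_of_length_le (by omega)]
  | cons j rest ih =>
    intro m
    simp only [List.foldl_cons]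
    by_cases h : i.toNat < m.length
    · rw [ih]
      have hget : PySem.List.pyGetD (PySem.List.pySetD m i (F (PySem.List.pyGetD m i d) j)) i d
          = F (PySem.List.pyGetD m i d) j := by
        rw [PySem.List.pySetD_of_nonneg _ _ hi,
            PySem.List.pyGetD_eq_getElem _ _ hi (by simp only [List.length_set]; omega),
            List.getElem_set_self (by simpa using h)]
      rw [hget, PySem.List.pySetD_of_nonneg _ _ hi, PySem.List.pySetD_of_nonneg _ _ hi,
          PySem.List.pySetD_of_nonneg _ _ hi, List.set_set]
    · have hset : ∀ x, PySem.List.pySetD m i x = m := fun x => by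
        rw [PySem.List.pySetD_of_nonneg _ _ hi, List.set_eq_of_length_le (by omega)]
      rw [ih, hset, hset, hset]

lemma pv_fold_set_map_aux {α : Type} (d : α) (G : Int → α → α) (f : Int → α) (n : Nat) :
    ∀ k : Nat, k ≤ n →
      (PySem.List.pyRange 0 (k : Int) 1).foldl
          (fun m i => PySem.List.pySetD m i (G i (PySem.List.pyGetD m i d)))
          ((PySem.List.pyRange 0 (n : Int) 1).map f)
      = (PySem.List.pyRange 0 (k : Int) 1).map (fun i => G i (f i))
          ++ (PySem.List.pyRange (k : Int) (n : Int) 1).map f := by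
  intro k
  induction k with
  | zero =>
    intro _
    simp [PySem.List.pyRange_one_eq_nil (le_refl (0 : Int))]
  | succ k ih =>
    intro hk
    have hcast : ((k + 1 : Nat) : Int) = (k : Int) + 1 := by push_cast; ring
    have hkn : (k : Int) < (n : Int) := by exact_mod_cast hk
    rw [hcast, PySem.List.pyRange_one_succ_right (by positivity : (0:Int) ≤ (k:Int)),
        List.foldl_append, ih (by omega), List.foldl_cons, List.foldl_nil,
        PySem.List.pyRange_one_cons hkn, List.map_cons, List.map_append, List.map_singleton]
    set A := (PySem.List.pyRange 0 (k:Int)).map (fun i => G i (f i)) with hA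
    have hAlen : A.length = k := by simp [hA, PySem.List.length_pyRange_one]
    have hget : PySem.List.pyGetD (A ++ f (k:Int) :: (PySem.List.pyRange ((k:Int)+1) (n:Int)).map f) (k:Int) d = f (k:Int) := by
      rw [PySem.List.pyGetD_natCast, List.getD_eq_getElem?_getD,
          List.getElem?_append_right (by omega), hAlen]
      simp
    rw [hget, PySem.List.pySetD_of_nonneg _ _ (by positivity), Int.toNat_natCast,
        List.set_append_right _ _ (by omega), hAlen, Nat.sub_self, List.set_cons_zero,
        List.append_assoc, List.singleton_append]
lemma pv_fold_set_map {α : Type} (d : α) (G : Int → α → α) (f : Int → α) (r : Int) (hr : 0 ≤ r) :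
    (PySem.List.pyRange 0 r 1).foldl
        (fun m i => PySem.List.pySetD m i (G i (PySem.List.pyGetD m i d)))
        ((PySem.List.pyRange 0 r 1).map f)
    = (PySem.List.pyRange 0 r 1).map (fun i => G i (f i)) := by
  obtain ⟨m, rfl⟩ : ∃ m : Nat, r = (m : Int) := ⟨r.toNat, (Int.toNat_of_nonneg hr).symm⟩
  have := pv_fold_set_map_aux d G f m m le_rfl
  simpa [PySem.List.pyRange_one_eq_nil (le_refl ((m : Nat) : Int))] using this
lemma pv_join_nil_flatten (ws : List (List Char)) : PySem.Chars.join [] ws = ws.flatten := by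
  induction ws with
  | nil => simp [PySem.Chars.join_nil]
  | cons p rest ih =>
    cases rest with
    | nil => simp [PySem.Chars.join_singleton]
    | cons q rest2 =>
      rw [PySem.Chars.join_cons_cons, List.flatten_cons, ← ih]
      simp
lemma pv_flatten_flatMap (L : List Int) (F : Int → List (List Char)) :
    (L.flatMap F).flatten = L.flatMap (fun x => (F x).flatten) := by
  induction L with
  | nil => simp
  | cons x rest ih => simp [List.flatMap_cons, List.flatten_append, ih]

-- canonical form of both third components: the fold-built matrix pipeline of A equals
-- B's join-formatted flat reads, for 0 ≤ r and 0 < c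
lemma pv_main (w : Int → Int) (n r c : Int) (hr : 0 ≤ r) (hc : 0 < c) :
    (PySem.List.pyRange 0 r 1).foldl (fun s i =>
        (PySem.List.pyRange 0 c 1).foldl (fun s j =>
          s ++ PySem.Int.toChars (PySem.List.pyGetD (PySem.List.pyGetD
              ((PySem.List.pyRange 0 r 1).foldl (fun m i =>
                (PySem.List.pyRange 0 c 1).foldl (fun m j =>
                  PySem.List.pySetD m i (PySem.List.pySetD (PySem.List.pyGetD m i [])
                    j ((PySem.List.pyGetD (PySem.List.pyGetD m i []) j 0) * n))) m)
                ((PySem.List.pyRange 0 r 1).foldl (fun m i =>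
                  (PySem.List.pyRange 0 c 1).foldl (fun m j =>
                    PySem.List.pySetD m i (PySem.List.pySetD (PySem.List.pyGetD m i [])
                      j (w (i * c + j)))) m)
                  ((PySem.List.pyRange 0 r 1).foldl
                    (fun m _ => m ++ [List.replicate c.toNat (0 : Int)]) []))) i []) j 0)
            ++ (if j = c - 1 then ['\n'] else [' '])) s) []
    = PySem.Chars.join [] ((PySem.List.pyRange 0 r 1).foldl (fun out i =>
        (PySem.List.pyRange 0 c 1).foldl (fun out j =>
          (out ++ [PySem.Int.toChars (w (i * c + j) * n)])
            ++ [if j = c - 1 then ['\n'] else [' ']]) out) []) := by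
  have hmemR : ∀ i ∈ PySem.List.pyRange 0 r 1, 0 ≤ i ∧ i < r := fun i hi => by
    simpa using PySem.List.mem_pyRange_one.mp hi
  have hmemC : ∀ j ∈ PySem.List.pyRange 0 c 1, 0 ≤ j ∧ j < c := fun j hj => by
    simpa using PySem.List.mem_pyRange_one.mp hj
  -- matrix0 : the row-appending loop is a constant range-map
  have h0 : (PySem.List.pyRange 0 r 1).foldl
        (fun m _ => m ++ [List.replicate c.toNat (0 : Int)]) []
      = (PySem.List.pyRange 0 r 1).map (fun _ => List.replicate c.toNat (0 : Int)) := by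
    have := PySem.List.foldl_append_singleton_eq_map
      (fun _ : Int => List.replicate c.toNat (0 : Int)) (PySem.List.pyRange 0 r 1) []
    rwa [List.nil_append] at this
  -- the replicate row is itself a constant range-map
  have hrep : List.replicate c.toNat (0 : Int)
      = (PySem.List.pyRange 0 c 1).map (fun _ => (0 : Int)) := by
    rw [List.map_const', PySem.List.length_pyRange_one]
    norm_num
  -- matrix1 : the fill loop
  have h1 : (PySem.List.pyRange 0 r 1).foldl (fun m i =>
        (PySem.List.pyRange 0 c 1).foldl (fun m j =>
          PySem.List.pySetD m i (PySem.List.pySetD (PySem.List.pyGetD m i [])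
            j (w (i * c + j)))) m)
        ((PySem.List.pyRange 0 r 1).foldl
          (fun m _ => m ++ [List.replicate c.toNat (0 : Int)]) [])
      = (PySem.List.pyRange 0 r 1).map (fun i =>
          (PySem.List.pyRange 0 c 1).map (fun j => w (i * c + j))) := by
    rw [h0, PySem.List.foldl_congr_mem' _ _ (fun m i => PySem.List.pySetD m i
        ((fun i row => (PySem.List.pyRange 0 c 1).foldl
          (fun row j => PySem.List.pySetD row j (w (i * c + j))) row) i
          (PySem.List.pyGetD m i []))) _
        (fun i hi m => pv_foldl_set_fixed []
          (fun row j => PySem.List.pySetD row j (w (i * c + j))) i (hmemR i hi).1 _ m)]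
    rw [pv_fold_set_map ([] : List Int)
        (fun i row => (PySem.List.pyRange 0 c 1).foldl
          (fun row j => PySem.List.pySetD row j (w (i * c + j))) row)
        (fun _ => List.replicate c.toNat (0 : Int)) r hr]
    refine List.map_congr_left (fun i _ => ?_)
    show (PySem.List.pyRange 0 c 1).foldl
        (fun row j => PySem.List.pySetD row j (w (i * c + j)))
        (List.replicate c.toNat (0 : Int)) = _
    rw [hrep]
    exact pv_fold_set_map 0 (fun j _ => w (i * c + j)) (fun _ => (0 : Int)) c hc.le
  -- matrix2 : the in-place multiplication loop
  have h2 : (PySem.List.pyRange 0 r 1).foldl (fun m i =>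
        (PySem.List.pyRange 0 c 1).foldl (fun m j =>
          PySem.List.pySetD m i (PySem.List.pySetD (PySem.List.pyGetD m i [])
            j ((PySem.List.pyGetD (PySem.List.pyGetD m i []) j 0) * n))) m)
        ((PySem.List.pyRange 0 r 1).foldl (fun m i =>
          (PySem.List.pyRange 0 c 1).foldl (fun m j =>
            PySem.List.pySetD m i (PySem.List.pySetD (PySem.List.pyGetD m i [])
              j (w (i * c + j)))) m)
          ((PySem.List.pyRange 0 r 1).foldl
            (fun m _ => m ++ [List.replicate c.toNat (0 : Int)]) []))
      = (PySem.List.pyRange 0 r 1).map (fun i =>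
          (PySem.List.pyRange 0 c 1).map (fun j => w (i * c + j) * n)) := by
    rw [h1, PySem.List.foldl_congr_mem' _ _ (fun m i => PySem.List.pySetD m i
        ((fun i row => (PySem.List.pyRange 0 c 1).foldl
          (fun row j => PySem.List.pySetD row j ((PySem.List.pyGetD row j 0) * n)) row) i
          (PySem.List.pyGetD m i []))) _
        (fun i hi m => pv_foldl_set_fixed []
          (fun row j => PySem.List.pySetD row j ((PySem.List.pyGetD row j 0) * n))
          i (hmemR i hi).1 _ m)]
    rw [pv_fold_set_map ([] : List (Int))
        (fun i row => (PySem.List.pyRange 0 c 1).foldl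
          (fun row j => PySem.List.pySetD row j ((PySem.List.pyGetD row j 0) * n)) row)
        (fun i => (PySem.List.pyRange 0 c 1).map (fun j => w (i * c + j))) r hr]
    refine List.map_congr_left (fun i _ => ?_)
    exact pv_fold_set_map 0 (fun _ x => x * n) (fun j => w (i * c + j)) c hc.le
  rw [h2]
  -- A's output loop, as a flatMap of the printed pieces
  rw [PySem.List.foldl_congr_mem' _ _ (fun s i =>
      s ++ (PySem.List.pyRange 0 c 1).flatMap (fun j =>
        PySem.Int.toChars (w (i * c + j) * n) ++ (if j = c - 1 then ['\n'] else [' ']))) _ ?_]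
  · rw [PySem.List.foldl_append_eq_flatMap, List.nil_append]
    -- B's piece-collecting loop, as a flatMap of singleton pieces
    rw [PySem.List.foldl_congr_mem' _ _ (fun (out : List (List Char)) i =>
        out ++ (PySem.List.pyRange 0 c 1).flatMap (fun j =>
          [PySem.Int.toChars (w (i * c + j) * n)] ++ [if j = c - 1 then ['\n'] else [' ']])) _ ?_]
    · rw [PySem.List.foldl_append_eq_flatMap, List.nil_append, pv_join_nil_flatten,
          pv_flatten_flatMap]
      rw [show (fun i : Int => ((PySem.List.pyRange 0 c 1).flatMap (fun j =>
            [PySem.Int.toChars (w (i * c + j) * n)] ++ [if j = c - 1 then ['\n'] else [' ']])).flatten)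
          = fun i : Int => (PySem.List.pyRange 0 c 1).flatMap (fun j =>
            PySem.Int.toChars (w (i * c + j) * n) ++ (if j = c - 1 then ['\n'] else [' '])) from
        funext fun i => by rw [pv_flatten_flatMap]; simp]
    · intro i hi out
      rw [PySem.List.foldl_congr_mem' _ _ (fun (out : List (List Char)) j =>
          out ++ ([PySem.Int.toChars (w (i * c + j) * n)] ++ [if j = c - 1 then ['\n'] else [' ']])) _
          (fun j hj acc => by rw [List.append_assoc])]
      exact PySem.List.foldl_append_eq_flatMap _ _ _
  · intro i hi s
    have hgetRow : PySem.List.pyGetD ((PySem.List.pyRange 0 r 1).map (fun i =>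
        (PySem.List.pyRange 0 c 1).map (fun j => w (i * c + j) * n))) i []
        = (PySem.List.pyRange 0 c 1).map (fun j => w (i * c + j) * n) :=
      PySem.List.pyGetD_map_pyRange_of_nonneg _ r i [] (hmemR i hi).1 (hmemR i hi).2
    rw [hgetRow, PySem.List.foldl_congr_mem' _ _ (fun s j =>
        s ++ (PySem.Int.toChars (w (i * c + j) * n) ++ (if j = c - 1 then ['\n'] else [' ']))) _
        (fun j hj acc => by
          rw [PySem.List.pyGetD_map_pyRange_of_nonneg _ c j 0 (hmemC j hj).1 (hmemC j hj).2,
            List.append_assoc])]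
    exact PySem.List.foldl_append_eq_flatMap _ _ _

-- ===== VERDICT (by name: the statement is the Claim_ definition above) =====
theorem multiply_matrix_by_number_spec : Claim_equal_multiply_matrix_by_number := by
  intro ri ci mi ni _ hpre
  obtain ⟨-, -, -, hrc⟩ := hpre
  simp only [Spec_multiply_matrix_by_number, multiply_matrix_by_number,
    multiply_matrix_by_number_alt, Prod.mk.injEq]
  refine ⟨trivial, trivial, congrArg String.ofList ?_⟩
  by_cases hr : 0 < (PySem.Int.ofChars? ri.toList).getD 0
  · by_cases hc : 0 < (PySem.Int.ofChars? ci.toList).getD 0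
    · exact pv_main
        (fun ind => (PySem.Int.ofChars? (PySem.List.pyGetD (PySem.Chars.split₀ mi.toList) ind [])).getD 0)
        ((PySem.Int.ofChars? ni.toList).getD 0)
        ((PySem.Int.ofChars? ri.toList).getD 0)
        ((PySem.Int.ofChars? ci.toList).getD 0)
        hr.le hc
    · have hnilC : PySem.List.pyRange 0 ((PySem.Int.ofChars? ci.toList).getD 0) 1 = [] :=
        PySem.List.pyRange_one_eq_nil (by omega)
      simp [hnilC, List.foldl_fixed, PySem.Chars.join_nil]
  · have hnilR : PySem.List.pyRange 0 ((PySem.Int.ofChars? ri.toList).getD 0) 1 = [] :=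
      PySem.List.pyRange_one_eq_nil (by omega)
    simp [hnilR, PySem.Chars.join_nil]
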